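-- pv_equiv track=rewrite | github.com/blhwong/algos_py | algo_exp/airport_connections/main.py | airportConnections
-- ===== SOURCE A (Python) =====
-- def get_rank(airport, graph, startingAirport, visited):
--     visited.add(airport)
--     count = 0
--     for a in graph[airport]:
--         if a != startingAirport and a not in visited:
--             visited.add(a)
--             count += (1 + get_rank(a, graph, startingAirport, visited))
--
--     return count
--
-- def get_ranked_list(airports, graph, startingAirport):
--     ranks = {}
--     for airport in airports:
--         ranks[airport] = get_rank(airport, graph, startingAirport, set())
--
--     return sorted(list(ranks.items()), key=lambda x: x[1], reverse=True)
--
-- def dfs(airport, graph, startingAirport, visited, final_count):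
--     if len(visited) == final_count:
--         return True
--     if airport in visited:
--         return False
--     visited.add(airport)
--     for a in graph[airport]:
--         if a != startingAirport:
--             done = dfs(a, graph, startingAirport, visited, final_count)
--             if done:
--                 return True
--
--     return False
--
-- def get_graph(airports, routes):
--     graph = { airport: [] for airport in airports }
--     for route in routes:
--         v, e = route
--         graph[v].append(e)
--     return graph
--
-- def airportConnections(airports, routes, startingAirport):
--     graph = get_graph(airports, routes)
--     ranked_list = get_ranked_list(airports, graph, startingAirport)
--
--     ans = 0
--     visited = set()
--
--     for airport, _ in ranked_list:
--         if airport in visited: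
--             continue
--         if airport != startingAirport:
--             ans += 1
--         done = dfs(airport, graph, startingAirport, visited, len(airports))
--         if done:
--             break
--
--     return ans
-- ===== SOURCE B (Python) =====
-- def _rank_iter(airport, graph, startingAirport):
--     visited = {airport}
--     count = 0
--     stack = [iter(graph[airport])]
--     while stack:
--         a = next(stack[-1], None)
--         if a is None:
--             stack.pop()
--             continue
--         if a != startingAirport and a not in visited:
--             visited.add(a)
--             count += 1
--             stack.append(iter(graph[a]))
--     return count
--
--
-- def _dfs_iter(airport, graph, startingAirport, visited, final_count):
--     if len(visited) == final_count:
--         return True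
--     if airport in visited:
--         return False
--     visited.add(airport)
--     stack = [iter(graph[airport])]
--     while stack:
--         a = next(stack[-1], None)
--         if a is None:
--             stack.pop()
--             continue
--         if a != startingAirport:
--             if len(visited) == final_count:
--                 return True
--             if a not in visited:
--                 visited.add(a)
--                 stack.append(iter(graph[a]))
--     return False
--
--
-- def airportConnections(airports, routes, startingAirport):
--     graph = {airport: [] for airport in airports}
--     for v, e in routes:
--         graph[v].append(e)
--     ranks = {}
--     for airport in airports:
--         ranks[airport] = _rank_iter(airport, graph, startingAirport)
--     ranked = sorted(ranks.items(), key=lambda x: x[1], reverse=True)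
--     ans = 0
--     visited = set()
--     for airport, _ in ranked:
--         if airport in visited:
--             continue
--         if airport != startingAirport:
--             ans += 1
--         if _dfs_iter(airport, graph, startingAirport, visited, len(airports)):
--             break
--     return ans
-- ===== Notes on version B (the rewrite author's own statement) =====
-- stated objective: alternative
-- what changed: Both recursive DFS helpers (get_rank's counting traversal and the main dfs sweep) are replaced by iterative traversals over an explicit stack of neighbour iterators, eliminating Python recursion (no RecursionError on deep graphs); graph building, ranking order, stable descending sort and the greedy sweep are unchanged.
import Mathlib
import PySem

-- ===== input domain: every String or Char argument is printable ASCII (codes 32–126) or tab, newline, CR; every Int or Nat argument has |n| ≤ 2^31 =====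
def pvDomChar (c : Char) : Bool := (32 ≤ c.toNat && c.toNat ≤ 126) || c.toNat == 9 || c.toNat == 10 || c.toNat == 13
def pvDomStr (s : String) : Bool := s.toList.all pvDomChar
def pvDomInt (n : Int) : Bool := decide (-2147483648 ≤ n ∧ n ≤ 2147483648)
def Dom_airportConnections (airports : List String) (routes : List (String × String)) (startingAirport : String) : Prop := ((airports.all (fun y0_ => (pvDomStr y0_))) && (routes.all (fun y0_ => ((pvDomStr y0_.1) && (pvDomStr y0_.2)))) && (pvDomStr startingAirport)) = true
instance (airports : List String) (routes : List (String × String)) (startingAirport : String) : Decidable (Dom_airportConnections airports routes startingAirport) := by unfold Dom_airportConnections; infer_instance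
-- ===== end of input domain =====

-- B replaces A's recursive DFS helpers by iterative stack-of-iterators traversals (same
-- traversal order, explicit stack instead of the call stack); equivalence is about the
-- return value only (neither program mutates its arguments).

-- ===== PORT A =====
-- get_graph: dict of empty lists over airports, then graph[v].append(e) per route
def pvGraphA (airports : List String) (routes : List (String × String)) : PySem.Dict String (List String) :=
  routes.foldl (fun g r => g.modify r.1 [] (fun l => l ++ [r.2]))
    (airports.foldl (fun g a => g.insert a []) PySem.Dict.empty)

-- the 'for a in graph[airport]' loop of get_rank; fuel = recursion depth (one unit per
-- nested get_rank call), chosen large enough below that it never runs out on Pre_ inputs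
def pvRankLoopA (g : PySem.Dict String (List String)) (start : String) :
    Nat → List String → Int × PySem.Set String → Int × PySem.Set String
  | _, [], cv => cv
  | fuel, a :: rest, (c, vis) =>
    if a ≠ start ∧ a ∉ vis then
      match fuel with
      | 0 => (c, vis)
      | f + 1 =>
        let vis1 := PySem.Set.add vis a
        -- get_rank(a, …): visited.add(a) again (a no-op), then its neighbour loop
        let r := pvRankLoopA g start f (g.getD a []) (0, PySem.Set.add vis1 a)
        pvRankLoopA g start (f + 1) rest (c + (1 + r.1), r.2)
    else pvRankLoopA g start fuel rest (c, vis)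
  termination_by fuel pending _ => (fuel, pending.length)

-- get_rank(airport, graph, startingAirport, set())
def pvGetRankA (g : PySem.Dict String (List String)) (start : String) (fuel : Nat) (airport : String) : Int :=
  (pvRankLoopA g start fuel (g.getD airport []) (0, PySem.Set.add PySem.Set.empty airport)).1

-- the 'for a in graph[airport]' loop of dfs, with dfs's entry checks inlined at each call
def pvDfsLoopA (g : PySem.Dict String (List String)) (start : String) (fc : Int) :
    Nat → List String → PySem.Set String → Bool × PySem.Set String
  | _, [], vis => (false, vis)
  | fuel, a :: rest, vis =>
    if a ≠ start then
      match fuel with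
      | 0 => (false, vis)
      | f + 1 =>
        -- dfs(a, …): len check, membership check, then mark and loop over graph[a]
        let r :=
          if PySem.Set.len vis = fc then (true, vis)
          else if a ∈ vis then (false, vis)
          else pvDfsLoopA g start fc f (g.getD a []) (PySem.Set.add vis a)
        if r.1 then (true, r.2) else pvDfsLoopA g start fc (f + 1) rest r.2
    else pvDfsLoopA g start fc fuel rest vis
  termination_by fuel pending _ => (fuel, pending.length)

-- the top-level dfs(airport, graph, startingAirport, visited, final_count) call
def pvDfsA (g : PySem.Dict String (List String)) (start : String) (fc : Int) (fuel : Nat)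
    (airport : String) (vis : PySem.Set String) : Bool × PySem.Set String :=
  if PySem.Set.len vis = fc then (true, vis)
  else if airport ∈ vis then (false, vis)
  else pvDfsLoopA g start fc fuel (g.getD airport []) (PySem.Set.add vis airport)

-- the 'for airport, _ in ranked_list' loop with its break
def pvMainLoopA (g : PySem.Dict String (List String)) (start : String) (fc : Int) (fuel : Nat) :
    List (String × Int) → Int → PySem.Set String → Int
  | [], ans, _ => ans
  | (airport, _) :: rest, ans, vis =>
    if airport ∈ vis then pvMainLoopA g start fc fuel rest ans vis
    else
      let ans1 := if airport ≠ start then ans + 1 else ans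
      let r := pvDfsA g start fc fuel airport vis
      if r.1 then ans1 else pvMainLoopA g start fc fuel rest ans1 r.2

def airportConnections (airports : List String) (routes : List (String × String)) (startingAirport : String) : Int :=
  let g := pvGraphA airports routes
  let ranks := airports.foldl
    (fun d a => d.insert a (pvGetRankA g startingAirport (airports.length + 1) a)) PySem.Dict.empty
  let ranked := PySem.List.sorted ranks.items (fun x => x.2) true
  pvMainLoopA g startingAirport (airports.length : Int) (airports.length + 1) ranked 0 PySem.Set.empty

-- ===== PORT B =====
def pvGraphB (airports : List String) (routes : List (String × String)) : PySem.Dict String (List String) :=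
  routes.foldl (fun g r => g.modify r.1 [] (fun l => l ++ [r.2]))
    (airports.foldl (fun g a => g.insert a []) PySem.Dict.empty)

-- termination facts cited by the machines' decreasing_by below
theorem pv_filter_mono {α : Type} (p q : α → Bool) (h : ∀ x, q x = true → p x = true) :
    ∀ L : List α, (L.filter q).length ≤ (L.filter p).length := by
  intro L
  induction L with
  | nil => simp
  | cons b L ih =>
    cases hqb : q b <;> cases hpb : p b <;>
      simp only [List.filter_cons, hqb, hpb, List.length_cons, Bool.false_eq_true,
        if_true, if_false] <;> try omega
    exact absurd (h b hqb) (by simp [hpb])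

theorem pv_filter_lt {α : Type} (p q : α → Bool) (h : ∀ x, q x = true → p x = true)
    (a : α) (hp : p a = true) (hq : q a = false) :
    ∀ L : List α, a ∈ L → (L.filter q).length < (L.filter p).length := by
  intro L ha
  induction L with
  | nil => cases ha
  | cons b L ih =>
    rcases List.mem_cons.mp ha with hb | hb
    · subst hb
      simp only [List.filter_cons, hp, hq, List.length_cons, Bool.false_eq_true,
        if_true, if_false]
      have := pv_filter_mono p q h L
      omega
    · have hL := ih hb
      cases hqb : q b <;> cases hpb : p b <;>
        simp only [List.filter_cons, hqb, hpb, List.length_cons, Bool.false_eq_true,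
          if_true, if_false] <;> try omega
      exact absurd (h b hqb) (by simp [hpb])

theorem pv_getD_eq_nil_of_not_mem_keys (g : PySem.Dict String (List String)) (a : String)
    (h : a ∉ g.keys) : g.getD a [] = [] := by
  apply PySem.Dict.getD_of_not_contains
  rw [PySem.Dict.contains_eq_decide_mem_keys]
  simp [h]

theorem pv_imp_add (vis : PySem.Set String) (a : String) :
    ∀ x : String, decide (x ∉ PySem.Set.add vis a) = true → decide (x ∉ vis) = true := by
  intro x hx
  simp only [decide_eq_true_eq] at *
  exact fun hc => hx (by simp [PySem.Set.mem_add]; exact Or.inl hc)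

-- _rank_iter's while loop: an explicit stack of iterators (each iterator = its remaining list)
def pvRankMachB (g : PySem.Dict String (List String)) (start : String) :
    List (List String) → Int × PySem.Set String → Int × PySem.Set String
  | [], cv => cv
  | [] :: K, cv => pvRankMachB g start K cv
  | (a :: rest) :: K, (c, vis) =>
    if a ≠ start ∧ a ∉ vis then
      pvRankMachB g start ((g.getD a []) :: rest :: K) (c + 1, PySem.Set.add vis a)
    else pvRankMachB g start (rest :: K) (c, vis)
  termination_by K cv =>
    (((g.keys).filter (fun x => decide (x ∉ cv.2))).length,
     2 * (K.map List.length).sum + K.length)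
  decreasing_by
    · apply Prod.Lex.right
      simp only [List.map_cons, List.sum_cons, List.length_cons, List.length_nil]
      omega
    · rename_i h
      by_cases hk : a ∈ g.keys
      · apply Prod.Lex.left
        exact pv_filter_lt _ _ (pv_imp_add vis a) a (by simp [h.2]) (by simp [PySem.Set.mem_add]) _ hk
      · have h1 := pv_filter_mono (fun x => decide (x ∉ vis))
          (fun x => decide (x ∉ PySem.Set.add vis a)) (pv_imp_add vis a) g.keys
        rcases lt_or_eq_of_le h1 with hlt | heq
        · exact Prod.Lex.left _ _ hlt
        · rw [heq]
          apply Prod.Lex.right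
          rw [pv_getD_eq_nil_of_not_mem_keys g a hk]
          simp only [List.map_cons, List.sum_cons, List.length_cons, List.length_nil]
          omega
    · apply Prod.Lex.right
      simp only [List.map_cons, List.sum_cons, List.length_cons]
      omega

-- _rank_iter(airport, graph, startingAirport)
def pvRankB (g : PySem.Dict String (List String)) (start : String) (airport : String) : Int :=
  (pvRankMachB g start [g.getD airport []] (0, PySem.Set.add PySem.Set.empty airport)).1

-- _dfs_iter's while loop
def pvDfsMachB (g : PySem.Dict String (List String)) (start : String) (fc : Int) :
    List (List String) → PySem.Set String → Bool × PySem.Set String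
  | [], vis => (false, vis)
  | [] :: K, vis => pvDfsMachB g start fc K vis
  | (a :: rest) :: K, vis =>
    if a ≠ start then
      if PySem.Set.len vis = fc then (true, vis)
      else if a ∈ vis then pvDfsMachB g start fc (rest :: K) vis
      else pvDfsMachB g start fc ((g.getD a []) :: rest :: K) (PySem.Set.add vis a)
    else pvDfsMachB g start fc (rest :: K) vis
  termination_by K vis =>
    (((g.keys).filter (fun x => decide (x ∉ vis))).length,
     2 * (K.map List.length).sum + K.length)
  decreasing_by
    · apply Prod.Lex.right
      simp only [List.map_cons, List.sum_cons, List.length_cons, List.length_nil]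
      omega
    · apply Prod.Lex.right
      simp only [List.map_cons, List.sum_cons, List.length_cons]
      omega
    · rename_i hne _ hnv
      by_cases hk : a ∈ g.keys
      · apply Prod.Lex.left
        exact pv_filter_lt _ _ (pv_imp_add vis a) a (by simp [hnv]) (by simp [PySem.Set.mem_add]) _ hk
      · have h1 := pv_filter_mono (fun x => decide (x ∉ vis))
          (fun x => decide (x ∉ PySem.Set.add vis a)) (pv_imp_add vis a) g.keys
        rcases lt_or_eq_of_le h1 with hlt | heq
        · exact Prod.Lex.left _ _ hlt
        · rw [heq]
          apply Prod.Lex.right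
          rw [pv_getD_eq_nil_of_not_mem_keys g a hk]
          simp only [List.map_cons, List.sum_cons, List.length_cons, List.length_nil]
          omega
    · apply Prod.Lex.right
      simp only [List.map_cons, List.sum_cons, List.length_cons]
      omega

-- _dfs_iter(airport, graph, startingAirport, visited, final_count)
def pvDfsB (g : PySem.Dict String (List String)) (start : String) (fc : Int)
    (airport : String) (vis : PySem.Set String) : Bool × PySem.Set String :=
  if PySem.Set.len vis = fc then (true, vis)
  else if airport ∈ vis then (false, vis)
  else pvDfsMachB g start fc [g.getD airport []] (PySem.Set.add vis airport)

def pvMainLoopB (g : PySem.Dict String (List String)) (start : String) (fc : Int) :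
    List (String × Int) → Int → PySem.Set String → Int
  | [], ans, _ => ans
  | (airport, _) :: rest, ans, vis =>
    if airport ∈ vis then pvMainLoopB g start fc rest ans vis
    else
      let ans1 := if airport ≠ start then ans + 1 else ans
      let r := pvDfsB g start fc airport vis
      if r.1 then ans1 else pvMainLoopB g start fc rest ans1 r.2

def airportConnections_alt (airports : List String) (routes : List (String × String)) (startingAirport : String) : Int :=
  let g := pvGraphB airports routes
  let ranks := airports.foldl
    (fun d a => d.insert a (pvRankB g startingAirport a)) PySem.Dict.empty
  let ranked := PySem.List.sorted ranks.items (fun x => x.2) true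
  pvMainLoopB g startingAirport (airports.length : Int) ranked 0 PySem.Set.empty

-- ===== PRECONDITION & SPEC =====
-- Pre_ excludes exactly the routes through names Python A cannot look up: a route whose
-- origin is not an airport (KeyError in get_graph) or whose destination is neither an
-- airport nor startingAirport (KeyError when the rank DFS expands it).
def Pre_airportConnections (airports : List String) (routes : List (String × String)) (startingAirport : String) : Prop :=
  ∀ r ∈ routes, r.1 ∈ airports ∧ (r.2 ∈ airports ∨ r.2 = startingAirport)
instance (airports : List String) (routes : List (String × String)) (startingAirport : String) : Decidable (Pre_airportConnections airports routes startingAirport) := by unfold Pre_airportConnections; infer_instance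

def pvWitness_airportConnections : List String × (List (String × String)) × String :=
  (["LGA", "JFK", "SFO"], [("LGA", "JFK"), ("SFO", "LGA")], "LGA")

def Spec_airportConnections (airports : List String) (routes : List (String × String)) (startingAirport : String) (out : Int) : Prop := out = airportConnections_alt airports routes startingAirport
instance (airports : List String) (routes : List (String × String)) (startingAirport : String) (out : Int) : Decidable (Spec_airportConnections airports routes startingAirport out) := by unfold Spec_airportConnections; infer_instance

-- ===== CLAIM (what is proved, stated in full; the proofs are below) =====
def Claim_equal_airportConnections : Prop := ∀ (airports : List String) (routes : List (String × String)) (startingAirport : String), Dom_airportConnections airports routes startingAirport → Pre_airportConnections airports routes startingAirport → Spec_airportConnections airports routes startingAirport (airportConnections airports routes startingAirport)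

-- ===== LEMMAS AND PROOFS =====

-- size of the not-yet-visited part of `airports`: the induction measure of all simulations
def pvMu (airports : List String) (vis : PySem.Set String) : Nat :=
  (airports.filter (fun x => decide (x ∉ vis))).length

theorem pv_mu_le_len (airports : List String) (vis : PySem.Set String) :
    pvMu airports vis ≤ airports.length := List.length_filter_le _ _

theorem pv_mu_mono (airports : List String) (v1 v2 : PySem.Set String)
    (h : ∀ x, x ∈ v1 → x ∈ v2) : pvMu airports v2 ≤ pvMu airports v1 := by
  apply pv_filter_mono
  intro x hx
  simp only [decide_eq_true_eq] at *
  exact fun hc => hx (h x hc)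

theorem pv_mu_add_lt (airports : List String) (vis : PySem.Set String) (a : String)
    (ha : a ∈ airports) (hv : a ∉ vis) :
    pvMu airports (PySem.Set.add vis a) < pvMu airports vis :=
  pv_filter_lt _ _ (pv_imp_add vis a) a (by simp [hv]) (by simp [PySem.Set.mem_add]) _ ha

theorem pv_add_add (vis : PySem.Set String) (a : String) :
    PySem.Set.add (PySem.Set.add vis a) a = PySem.Set.add vis a :=
  PySem.Set.add_of_mem (by simp [PySem.Set.mem_add])

-- A's rank loop only grows the visited set
theorem pv_rank_subset (g : PySem.Dict String (List String)) (start : String) :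
    ∀ (fuel : Nat) (as : List String) (c : Int) (vis : PySem.Set String),
      ∀ x ∈ vis, x ∈ (pvRankLoopA g start fuel as (c, vis)).2 := by
  intro fuel
  induction fuel with
  | zero =>
    intro as
    induction as with
    | nil => intro c vis x hx; simpa [pvRankLoopA] using hx
    | cons a rest iha =>
      intro c vis x hx
      by_cases hel : a ≠ start ∧ a ∉ vis
      · simp only [pvRankLoopA]
        rw [if_pos hel]
        exact hx
      · simp only [pvRankLoopA]
        rw [if_neg hel]
        exact iha c vis x hx
  | succ f ihf =>
    intro as
    induction as with
    | nil => intro c vis x hx; simpa [pvRankLoopA] using hx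
    | cons a rest iha =>
      intro c vis x hx
      by_cases hel : a ≠ start ∧ a ∉ vis
      · simp only [pvRankLoopA]
        rw [if_pos hel]
        simp only [pv_add_add]
        exact iha _ _ x (ihf (g.getD a []) 0 (PySem.Set.add vis a) x
          ((PySem.Set.mem_add vis a x).mpr (Or.inl hx)))
      · simp only [pvRankLoopA]
        rw [if_neg hel]
        exact iha c vis x hx

-- the count accumulator of A's rank loop is a pure offset
theorem pv_rank_shift (g : PySem.Dict String (List String)) (start : String) :
    ∀ (fuel : Nat) (as : List String) (vis : PySem.Set String) (c : Int),
      pvRankLoopA g start fuel as (c, vis) =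
        (c + (pvRankLoopA g start fuel as (0, vis)).1,
         (pvRankLoopA g start fuel as (0, vis)).2) := by
  intro fuel
  induction fuel with
  | zero =>
    intro as
    induction as with
    | nil => intro vis c; simp [pvRankLoopA]
    | cons a rest iha =>
      intro vis c
      by_cases hel : a ≠ start ∧ a ∉ vis
      · simp only [pvRankLoopA]
        rw [if_pos hel, if_pos hel]
        simp
      · simp only [pvRankLoopA]
        rw [if_neg hel, if_neg hel]
        exact iha vis c
  | succ f ihf =>
    intro as
    induction as with
    | nil => intro vis c; simp [pvRankLoopA]
    | cons a rest iha =>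
      intro vis c
      by_cases hel : a ≠ start ∧ a ∉ vis
      · simp only [pvRankLoopA]
        rw [if_pos hel, if_pos hel]
        simp only [pv_add_add, zero_add]
        set X := pvRankLoopA g start f (g.getD a []) (0, PySem.Set.add vis a) with hX
        rw [iha X.2 (c + (1 + X.1)), iha X.2 (1 + X.1)]
        simp only [Prod.mk.injEq]
        exact ⟨by ring, trivial⟩
      · simp only [pvRankLoopA]
        rw [if_neg hel, if_neg hel]
        exact iha vis c

-- A's dfs loop only grows the visited set
theorem pv_dfs_subset (g : PySem.Dict String (List String)) (start : String) (fc : Int) :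
    ∀ (fuel : Nat) (as : List String) (vis : PySem.Set String),
      ∀ x ∈ vis, x ∈ (pvDfsLoopA g start fc fuel as vis).2 := by
  intro fuel
  induction fuel with
  | zero =>
    intro as
    induction as with
    | nil => intro vis x hx; simpa [pvDfsLoopA] using hx
    | cons a rest iha =>
      intro vis x hx
      by_cases hst : a ≠ start
      · simp only [pvDfsLoopA]
        rw [if_pos hst]
        exact hx
      · simp only [pvDfsLoopA]
        rw [if_neg hst]
        exact iha vis x hx
  | succ f ihf =>
    intro as
    induction as with
    | nil => intro vis x hx; simpa [pvDfsLoopA] using hx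
    | cons a rest iha =>
      intro vis x hx
      by_cases hst : a ≠ start
      · simp only [pvDfsLoopA]
        rw [if_pos hst]
        by_cases h1 : PySem.Set.len vis = fc
        · rw [if_pos h1]
          simpa using hx
        · rw [if_neg h1]
          by_cases h2 : a ∈ vis
          · rw [if_pos h2]
            simpa using iha vis x hx
          · rw [if_neg h2]
            have hin : x ∈ (pvDfsLoopA g start fc f (g.getD a []) (PySem.Set.add vis a)).2 :=
              ihf (g.getD a []) (PySem.Set.add vis a) x ((PySem.Set.mem_add vis a x).mpr (Or.inl hx))
            split
            · simpa using hin
            · simpa using iha _ x hin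
      · simp only [pvDfsLoopA]
        rw [if_neg hst]
        exact iha vis x hx

-- SIMULATION, rank: B's stack machine runs A's neighbour loop frame by frame
theorem pv_simR (g : PySem.Dict String (List String)) (start : String) (airports : List String)
    (Hg : ∀ u : String, ∀ x ∈ g.getD u [], x = start ∨ x ∈ airports) :
    ∀ (k : Nat) (vis : PySem.Set String), pvMu airports vis ≤ k →
      ∀ (fuel : Nat), pvMu airports vis < fuel →
      ∀ (as : List String), (∀ a ∈ as, a = start ∨ a ∈ airports) →
      ∀ (K : List (List String)) (c : Int),
        pvRankMachB g start (as :: K) (c, vis) =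
          pvRankMachB g start K (pvRankLoopA g start fuel as (c, vis)) := by
  intro k
  induction k with
  | zero =>
    intro vis hk fuel hfuel as
    rcases fuel with _ | f
    · exact absurd hfuel (by omega)
    · induction as with
      | nil => intro _ K c; simp [pvRankMachB, pvRankLoopA]
      | cons a rest iha =>
        intro hAs K c
        by_cases hel : a ≠ start ∧ a ∉ vis
        · exfalso
          have ha : a ∈ airports := by
            rcases hAs a (List.mem_cons_self) with h | h
            · exact absurd h hel.1
            · exact h
          have := pv_mu_add_lt airports vis a ha hel.2
          omega
        · simp only [pvRankMachB, pvRankLoopA]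
          rw [if_neg hel, if_neg hel]
          exact iha (fun x hx => hAs x (List.mem_cons_of_mem _ hx)) K c
  | succ k ihk =>
    intro vis hk fuel hfuel as
    rcases fuel with _ | f
    · exact absurd hfuel (by omega)
    · induction as with
      | nil => intro _ K c; simp [pvRankMachB, pvRankLoopA]
      | cons a rest iha =>
        intro hAs K c
        by_cases hel : a ≠ start ∧ a ∉ vis
        · have ha : a ∈ airports := by
            rcases hAs a (List.mem_cons_self) with h | h
            · exact absurd h hel.1
            · exact h
          have hlt := pv_mu_add_lt airports vis a ha hel.2
          simp only [pvRankMachB, pvRankLoopA]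
          rw [if_pos hel, if_pos hel]
          simp only [pv_add_add]
          rw [ihk (PySem.Set.add vis a) (by omega) f (by omega) (g.getD a [])
            (fun x hx => Hg a x hx) (rest :: K) (c + 1)]
          rw [pv_rank_shift g start f (g.getD a []) (PySem.Set.add vis a) (c + 1)]
          set X := pvRankLoopA g start f (g.getD a []) (0, PySem.Set.add vis a) with hX
          have hsub : ∀ x ∈ PySem.Set.add vis a, x ∈ X.2 :=
            fun x hx => pv_rank_subset g start f _ 0 _ x hx
          rw [ihk X.2 (le_trans (pv_mu_mono airports _ _ hsub) (by omega)) (f + 1)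
            (lt_of_le_of_lt (pv_mu_mono airports _ _ hsub) (by omega)) rest
            (fun x hx => hAs x (List.mem_cons_of_mem _ hx)) K (c + 1 + X.1)]
          rw [show c + (1 + X.1) = c + 1 + X.1 from by ring]
        · simp only [pvRankMachB, pvRankLoopA]
          rw [if_neg hel, if_neg hel]
          exact iha (fun x hx => hAs x (List.mem_cons_of_mem _ hx)) K c

-- SIMULATION, dfs
theorem pv_simD (g : PySem.Dict String (List String)) (start : String) (fc : Int)
    (airports : List String)
    (Hg : ∀ u : String, ∀ x ∈ g.getD u [], x = start ∨ x ∈ airports) :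
    ∀ (k : Nat) (vis : PySem.Set String), pvMu airports vis ≤ k →
      ∀ (fuel : Nat), pvMu airports vis < fuel →
      ∀ (as : List String), (∀ a ∈ as, a = start ∨ a ∈ airports) →
      ∀ (K : List (List String)),
        pvDfsMachB g start fc (as :: K) vis =
          (if (pvDfsLoopA g start fc fuel as vis).1 then
            (true, (pvDfsLoopA g start fc fuel as vis).2)
          else pvDfsMachB g start fc K (pvDfsLoopA g start fc fuel as vis).2) := by
  intro k
  induction k with
  | zero =>
    intro vis hk fuel hfuel as
    rcases fuel with _ | f
    · exact absurd hfuel (by omega)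
    · induction as with
      | nil => intro _ K; simp [pvDfsMachB, pvDfsLoopA]
      | cons a rest iha =>
        intro hAs K
        by_cases hst : a ≠ start
        · by_cases h1 : PySem.Set.len vis = fc
          · simp only [pvDfsMachB, pvDfsLoopA]
            rw [if_pos hst, if_pos h1, if_pos hst, if_pos h1]
            simp
          · by_cases h2 : a ∈ vis
            · simp only [pvDfsMachB, pvDfsLoopA]
              rw [if_pos hst, if_neg h1, if_pos h2, if_pos hst, if_neg h1, if_pos h2]
              simpa using iha (fun x hx => hAs x (List.mem_cons_of_mem _ hx)) K
            · exfalso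
              have ha : a ∈ airports := by
                rcases hAs a (List.mem_cons_self) with h | h
                · exact absurd h hst
                · exact h
              have := pv_mu_add_lt airports vis a ha h2
              omega
        · simp only [pvDfsMachB, pvDfsLoopA]
          rw [if_neg hst, if_neg hst]
          exact iha (fun x hx => hAs x (List.mem_cons_of_mem _ hx)) K
  | succ k ihk =>
    intro vis hk fuel hfuel as
    rcases fuel with _ | f
    · exact absurd hfuel (by omega)
    · induction as with
      | nil => intro _ K; simp [pvDfsMachB, pvDfsLoopA]
      | cons a rest iha =>
        intro hAs K
        by_cases hst : a ≠ start
        · by_cases h1 : PySem.Set.len vis = fc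
          · simp only [pvDfsMachB, pvDfsLoopA]
            rw [if_pos hst, if_pos h1, if_pos hst, if_pos h1]
            simp
          · by_cases h2 : a ∈ vis
            · simp only [pvDfsMachB, pvDfsLoopA]
              rw [if_pos hst, if_neg h1, if_pos h2, if_pos hst, if_neg h1, if_pos h2]
              simpa using iha (fun x hx => hAs x (List.mem_cons_of_mem _ hx)) K
            · have ha : a ∈ airports := by
                rcases hAs a (List.mem_cons_self) with h | h
                · exact absurd h hst
                · exact h
              have hlt := pv_mu_add_lt airports vis a ha h2
              simp only [pvDfsMachB, pvDfsLoopA]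
              rw [if_pos hst, if_neg h1, if_neg h2, if_pos hst, if_neg h1, if_neg h2]
              rw [ihk (PySem.Set.add vis a) (by omega) f (by omega) (g.getD a [])
                (fun x hx => Hg a x hx) (rest :: K)]
              set r := pvDfsLoopA g start fc f (g.getD a []) (PySem.Set.add vis a) with hr
              cases hrb : r.1
              · simp only [hrb, Bool.false_eq_true, ite_false]
                have hsub : ∀ x ∈ PySem.Set.add vis a, x ∈ r.2 :=
                  fun x hx => pv_dfs_subset g start fc f _ _ x hx
                rw [ihk r.2 (le_trans (pv_mu_mono airports _ _ hsub) (by omega)) (f + 1)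
                  (lt_of_le_of_lt (pv_mu_mono airports _ _ hsub) (by omega)) rest
                  (fun x hx => hAs x (List.mem_cons_of_mem _ hx)) K]
              · simp [hrb]
        · simp only [pvDfsMachB, pvDfsLoopA]
          rw [if_neg hst, if_neg hst]
          exact iha (fun x hx => hAs x (List.mem_cons_of_mem _ hx)) K

-- the two dfs entry points agree whenever the fuel exceeds len(airports)
theorem pv_dfs_entry_eq (g : PySem.Dict String (List String)) (start : String) (fc : Int)
    (airports : List String)
    (Hg : ∀ u : String, ∀ x ∈ g.getD u [], x = start ∨ x ∈ airports)
    (fuel : Nat) (hf : airports.length < fuel) (airport : String) (vis : PySem.Set String) :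
    pvDfsB g start fc airport vis = pvDfsA g start fc fuel airport vis := by
  unfold pvDfsB pvDfsA
  split_ifs
  · rfl
  · rfl
  · rw [pv_simD g start fc airports Hg (pvMu airports (PySem.Set.add vis airport)) _
      le_rfl fuel (lt_of_le_of_lt (pv_mu_le_len airports _) hf) (g.getD airport [])
      (fun x hx => Hg airport x hx) []]
    set r := pvDfsLoopA g start fc fuel (g.getD airport []) (PySem.Set.add vis airport) with hr
    cases hrb : r.1
    · simp only [hrb, Bool.false_eq_true, ite_false, pvDfsMachB]
      exact Prod.ext (hrb.symm) rfl
    · simp only [hrb, ite_true]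
      exact Prod.ext (hrb.symm) rfl

-- the two rank computations agree
theorem pv_rank_eq (g : PySem.Dict String (List String)) (start : String)
    (airports : List String)
    (Hg : ∀ u : String, ∀ x ∈ g.getD u [], x = start ∨ x ∈ airports)
    (fuel : Nat) (hf : airports.length < fuel) (airport : String) :
    pvRankB g start airport = pvGetRankA g start fuel airport := by
  unfold pvRankB pvGetRankA
  rw [pv_simR g start airports Hg (pvMu airports (PySem.Set.add PySem.Set.empty airport)) _
    le_rfl fuel (lt_of_le_of_lt (pv_mu_le_len airports _) hf) (g.getD airport [])
    (fun x hx => Hg airport x hx) [] 0]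
  simp [pvRankMachB]

-- Pre_ gives the standing hypothesis about the built graph
theorem pv_graph_base (airports : List String) :
    ∀ u : String,
      (airports.foldl (fun (g : PySem.Dict String (List String)) (a : String) => g.insert a [])
        PySem.Dict.empty).getD u [] = [] := by
  suffices h : ∀ (l : List String) (d : PySem.Dict String (List String)),
      (∀ u : String, d.getD u [] = []) →
      ∀ u : String,
        (l.foldl (fun (g : PySem.Dict String (List String)) (a : String) => g.insert a []) d).getD u [] = [] by
    exact h airports PySem.Dict.empty (fun u => by simp)
  intro l
  induction l with
  | nil => intro d hd u; exact hd u
  | cons a l ih =>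
    intro d hd u
    apply ih
    intro v
    rw [PySem.Dict.getD_insert]
    split
    · rfl
    · exact hd v

theorem pv_graph_mem (airports : List String) (routes : List (String × String))
    (start : String) (hPre : Pre_airportConnections airports routes start) :
    ∀ u : String, ∀ x ∈ (pvGraphA airports routes).getD u [], x = start ∨ x ∈ airports := by
  unfold pvGraphA
  suffices h : ∀ (l : List (String × String)) (d : PySem.Dict String (List String)),
      (∀ u : String, ∀ x ∈ d.getD u [], x = start ∨ x ∈ airports) →
      (∀ r ∈ l, r.2 ∈ airports ∨ r.2 = start) →
      ∀ u : String,
        ∀ x ∈ (l.foldl (fun (g : PySem.Dict String (List String)) (r : String × String) =>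
          g.modify r.1 [] (fun ll => ll ++ [r.2])) d).getD u [],
        x = start ∨ x ∈ airports by
    apply h routes
    · intro u x hx
      rw [pv_graph_base airports u] at hx
      cases hx
    · exact fun r hr => (hPre r hr).2
  intro l
  induction l with
  | nil => intro d hd _ u x hx; exact hd u x hx
  | cons r l ih =>
    intro d hd hl u x hx
    refine ih _ ?_ (fun q hq => hl q (List.mem_cons_of_mem _ hq)) u x hx
    intro v y hy
    rw [PySem.Dict.getD_modify] at hy
    split at hy
    · rcases List.mem_append.mp hy with h | h
      · exact hd _ y h
      · have hyr : y = r.2 := List.mem_singleton.mp h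
        rw [hyr]
        rcases hl r List.mem_cons_self with h2 | h2
        · exact Or.inr h2
        · exact Or.inl h2
    · exact hd v y hy

-- the main sweeps agree
theorem pv_main_eq (g : PySem.Dict String (List String)) (start : String) (fc : Int)
    (airports : List String)
    (Hg : ∀ u : String, ∀ x ∈ g.getD u [], x = start ∨ x ∈ airports)
    (fuel : Nat) (hf : airports.length < fuel) :
    ∀ (l : List (String × Int)) (ans : Int) (vis : PySem.Set String),
      pvMainLoopB g start fc l ans vis = pvMainLoopA g start fc fuel l ans vis := by
  intro l
  induction l with
  | nil => intro ans vis; rfl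
  | cons p rest ih =>
    intro ans vis
    obtain ⟨airport, rk⟩ := p
    simp only [pvMainLoopB, pvMainLoopA]
    by_cases h2 : airport ∈ vis
    · rw [if_pos h2, if_pos h2]
      exact ih _ _
    · rw [if_neg h2, if_neg h2]
      rw [pv_dfs_entry_eq g start fc airports Hg fuel hf airport vis]
      split
      · rfl
      · exact ih _ _

-- ===== VERDICT (by name: the statement is the Claim_ definition above) =====
theorem airportConnections_spec : Claim_equal_airportConnections := by
  intro airports routes startingAirport _hDom hPre
  unfold Spec_airportConnections airportConnections airportConnections_alt
  show pvMainLoopA (pvGraphA airports routes) startingAirport (airports.length : Int)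
      (airports.length + 1)
      (PySem.List.sorted
        (airports.foldl
          (fun (d : PySem.Dict String Int) (a : String) =>
            d.insert a (pvGetRankA (pvGraphA airports routes) startingAirport (airports.length + 1) a))
          PySem.Dict.empty).items (fun x => x.2) true)
      0 PySem.Set.empty =
    pvMainLoopB (pvGraphB airports routes) startingAirport (airports.length : Int)
      (PySem.List.sorted
        (airports.foldl
          (fun (d : PySem.Dict String Int) (a : String) =>
            d.insert a (pvRankB (pvGraphB airports routes) startingAirport a))
          PySem.Dict.empty).items (fun x => x.2) true)
      0 PySem.Set.empty
  rw [show pvGraphB airports routes = pvGraphA airports routes from rfl]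
  have Hg := pv_graph_mem airports routes startingAirport hPre
  have hf : airports.length < airports.length + 1 := by omega
  have hranks : (fun (d : PySem.Dict String Int) (a : String) =>
      d.insert a (pvRankB (pvGraphA airports routes) startingAirport a)) =
      (fun (d : PySem.Dict String Int) (a : String) =>
        d.insert a (pvGetRankA (pvGraphA airports routes) startingAirport (airports.length + 1) a)) := by
    funext d a
    rw [pv_rank_eq (pvGraphA airports routes) startingAirport airports Hg _ hf a]
  rw [hranks]
  exact (pv_main_eq (pvGraphA airports routes) startingAirport (airports.length : Int)
    airports Hg (airports.length + 1) hf _ 0 PySem.Set.empty).symm
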